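-- pv_equiv track=rewrite | github.com/nessarus/ElectionCount | project2/project2.py | orderedPaper
-- ===== SOURCE A (Python) =====
-- def orderedPaper(p):
--     ordered = []
--     preferences = []
--     for i in range(len(p)):
--         if p[i] != 0:
--             preferences.append((p[i],i))
--     preferences.sort()
--     for i in range(len(preferences)):
--         ordered.append(preferences[i][1]+1)
--     return ordered
-- ===== SOURCE B (Python) =====
-- def orderedPaper(p):
--     buckets = {}
--     for i, v in enumerate(p):
--         if v != 0:
--             buckets[v] = buckets.get(v, []) + [i + 1]
--     ordered = []
--     for k in sorted(buckets):
--         ordered.extend(buckets[k])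
--     return ordered
-- ===== Notes on version B (the rewrite author's own statement) =====
-- stated objective: alternative
-- what changed: B replaces A's build-(pref,index)-pairs-then-tuple-sort with a group-by-preference dict of index buckets filled in one scan, emitted in sorted-key order.
import Mathlib
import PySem

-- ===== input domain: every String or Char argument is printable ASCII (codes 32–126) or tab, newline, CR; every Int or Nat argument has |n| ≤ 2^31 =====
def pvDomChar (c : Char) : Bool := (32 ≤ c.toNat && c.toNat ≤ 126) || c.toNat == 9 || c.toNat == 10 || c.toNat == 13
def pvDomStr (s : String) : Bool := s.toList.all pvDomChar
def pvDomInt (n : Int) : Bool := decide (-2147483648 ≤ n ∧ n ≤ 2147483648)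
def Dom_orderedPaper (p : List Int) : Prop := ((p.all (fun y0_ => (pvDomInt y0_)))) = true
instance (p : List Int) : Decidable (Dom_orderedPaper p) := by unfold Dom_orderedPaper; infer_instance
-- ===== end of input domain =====

-- B groups ballot indices into a dict of per-preference buckets in one scan and emits them in
-- sorted-key order, instead of A's build-(pref,index)-pairs-then-tuple-sort; objective: alternative.

-- ===== PORT A =====
def orderedPaper (p : List Int) : List Int :=
  let preferences : List (Int × Int) :=
    (PySem.List.pyRange 0 (PySem.List.len p)).foldl
      (fun acc i => if PySem.List.pyGetD p i 0 ≠ 0 then acc ++ [(PySem.List.pyGetD p i 0, i)] else acc) []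
  let prefsSorted := PySem.List.sorted2 preferences (fun x => x.1) (fun x => x.2)
  (PySem.List.pyRange 0 (PySem.List.len prefsSorted)).foldl
    (fun acc i => acc ++ [(PySem.List.pyGetD prefsSorted i (0, 0)).2 + 1]) []

-- ===== PORT B =====
def orderedPaper_alt (p : List Int) : List Int :=
  let buckets : PySem.Dict Int (List Int) :=
    (PySem.List.enumerate p).foldl
      (fun d iv => if iv.2 ≠ 0 then d.modify iv.2 [] (fun l => l ++ [iv.1 + 1]) else d)
      PySem.Dict.empty
  (PySem.List.sorted buckets.keys (fun k => k)).foldl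
    (fun out k => out ++ buckets.getD k []) []

-- ===== PRECONDITION & SPEC =====
def Spec_orderedPaper (p : List Int) (out : List Int) : Prop := out = orderedPaper_alt p
instance (p : List Int) (out : List Int) : Decidable (Spec_orderedPaper p out) := by unfold Spec_orderedPaper; infer_instance

-- ===== CLAIM (what is proved, stated in full; the proofs are below) =====
def Claim_equal_orderedPaper : Prop := ∀ (p : List Int), Dom_orderedPaper p → Spec_orderedPaper p (orderedPaper p)

-- ===== LEMMAS AND PROOFS =====

-- the nonzero (preference, index) pairs in scan order
def pvPrefs (p : List Int) : List (Int × Int) :=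
  ((PySem.List.enumerate p).filter (fun iv => decide (iv.2 ≠ 0))).map (fun iv => (iv.2, iv.1))

-- linear encoding of the lexicographic pair order, valid while 0 ≤ snd < M
def pvKey (M : Int) (x : Int × Int) : Int := x.1 * M + x.2

-- the sorted distinct preference values
def pvKeys (p : List Int) : List Int :=
  PySem.List.sorted (PySem.Set.ofList ((pvPrefs p).map (fun x => x.1))) (fun k => k)

-- the grouped pair list both ports are shown to produce
def pvGrouped (p : List Int) : List (Int × Int) :=
  (pvKeys p).flatMap (fun k => (pvPrefs p).filter (fun x => x.1 == k))

-- B's bucket dict, seen as a fold over the (preference, index+1) pairs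
def pvBuckets (p : List Int) : PySem.Dict Int (List Int) :=
  ((pvPrefs p).map (fun x => (x.1, x.2 + 1))).foldl
    (fun d q => d.modify q.1 [] (fun l => l ++ [q.2])) PySem.Dict.empty

lemma pvPrefs_snd_bounds (p : List Int) : ∀ x ∈ pvPrefs p, 0 ≤ x.2 ∧ x.2 < PySem.List.len p := by
  intro x hx
  simp only [pvPrefs, List.mem_map, List.mem_filter] at hx
  obtain ⟨iv, ⟨hiv, _⟩, rfl⟩ := hx
  rw [PySem.List.enumerate_eq_map_pyRange p 0] at hiv
  simp only [List.mem_map] at hiv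
  obtain ⟨j, hj, rfl⟩ := hiv
  simpa using PySem.List.mem_pyRange_one.mp hj

lemma pvPrefs_snd_pairwise (p : List Int) :
    (pvPrefs p).Pairwise (fun a b => a.2 < b.2) := by
  have h0 : (PySem.List.enumerate p).Pairwise (fun a b => a.1 < b.1) := by
    rw [PySem.List.enumerate_eq_map_pyRange p 0]
    rw [List.pairwise_map]
    have : (PySem.List.pyRange 0 (PySem.List.len p)).Pairwise (· < ·) := by
      have hlen : PySem.List.len p = ((p.length : Nat) : Int) := by simp [PySem.List.len]
      rw [hlen, PySem.List.pyRange_zero_natCast, List.pairwise_map]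
      exact List.pairwise_lt_range.imp (by intro a b h; exact_mod_cast h)
    exact this
  unfold pvPrefs
  rw [List.pairwise_map]
  exact (h0.filter _)

lemma lt2_eq_key (M : Int) (a b : Int × Int)
    (ha : 0 ≤ a.2 ∧ a.2 < M) (hb : 0 ≤ b.2 ∧ b.2 < M) :
    (decide (a.1 < b.1) || (!decide (b.1 < a.1) && decide (a.2 < b.2)))
      = decide (pvKey M a < pvKey M b) := by
  obtain ⟨a1, a2⟩ := a; obtain ⟨b1, b2⟩ := b
  simp only [pvKey] at *
  have hM : 0 ≤ M := le_of_lt (lt_of_le_of_lt ha.1 ha.2)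
  rcases lt_trichotomy a1 b1 with h | h | h
  · have h1 : (a1 + 1) * M ≤ b1 * M := mul_le_mul_of_nonneg_right (by omega) hM
    have : a1 * M + a2 < b1 * M + b2 := by nlinarith [ha.1, ha.2, hb.1, hb.2]
    simp [h, this]
  · subst h
    have : (a1 * M + a2 < a1 * M + b2) ↔ (a2 < b2) := by omega
    simp [this]
  · have h1 : (b1 + 1) * M ≤ a1 * M := mul_le_mul_of_nonneg_right (by omega) hM
    have : ¬ (a1 * M + a2 < b1 * M + b2) := by nlinarith [ha.1, ha.2, hb.1, hb.2]
    simp [this, h, not_lt.mpr (le_of_lt h)]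

lemma insertBy_congr {α : Type} (b1 b2 : α → α → Bool) (x : α) (acc : List α)
    (h : ∀ y ∈ acc, b1 x y = b2 x y) :
    PySem.List.insertBy b1 x acc = PySem.List.insertBy b2 x acc := by
  induction acc with
  | nil => rfl
  | cons y ys ih =>
    simp only [PySem.List.insertBy]
    rw [h y (List.mem_cons_self ..)]
    split
    · rfl
    · rw [ih (fun z hz => h z (List.mem_cons_of_mem _ hz))]

lemma foldl_insertBy_congr {α : Type} (b1 b2 : α → α → Bool) (S : List α)
    (hag : ∀ a ∈ S, ∀ b ∈ S, b1 a b = b2 a b) :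
    ∀ (xs acc : List α), (∀ x ∈ xs, x ∈ S) → (∀ y ∈ acc, y ∈ S) →
      xs.foldl (fun acc x => PySem.List.insertBy b1 x acc) acc
        = xs.foldl (fun acc x => PySem.List.insertBy b2 x acc) acc := by
  intro xs
  induction xs with
  | nil => intro acc _ _; rfl
  | cons x t ih =>
    intro acc hxs hacc
    have hx : x ∈ S := hxs x (List.mem_cons_self ..)
    simp only [List.foldl_cons]
    rw [insertBy_congr b1 b2 x acc (fun y hy => hag x hx y (hacc y hy))]
    exact ih _ (fun z hz => hxs z (List.mem_cons_of_mem _ hz))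
      (fun y hy => by rcases (PySem.List.mem_insertBy b2 x y acc).mp hy with rfl | hy'
                      exacts [hx, hacc y hy'])

lemma sorted2_eq_sorted_key (p : List Int) :
    PySem.List.sorted2 (pvPrefs p) (fun x => x.1) (fun x => x.2)
      = PySem.List.sorted (pvPrefs p) (pvKey (PySem.List.len p)) := by
  rw [PySem.List.sorted_eq_foldl_insertBy]
  show (pvPrefs p).foldl (fun acc x => PySem.List.insertBy
      (fun a b => decide (a.1 < b.1) || (!decide (b.1 < a.1) && decide (a.2 < b.2))) x acc) []
    = _
  exact foldl_insertBy_congr _ _ (pvPrefs p)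
    (fun a ha b hb => lt2_eq_key _ a b (pvPrefs_snd_bounds p a ha) (pvPrefs_snd_bounds p b hb))
    (pvPrefs p) [] (fun x hx => hx) (by simp)

lemma flatMap_filter_perm (K : List Int) :
    ∀ (l : List (Int × Int)), K.Nodup → (∀ x ∈ l, x.1 ∈ K) →
    (K.flatMap (fun k => l.filter (fun x => x.1 == k))).Perm l := by
  induction K with
  | nil =>
    intro l _ hcov
    have : l = [] := List.eq_nil_iff_forall_not_mem.mpr (fun x hx => by simpa using hcov x hx)
    simp [this]
  | cons k ks ih =>
    intro l hnd hcov
    simp only [List.flatMap_cons]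
    have hk : k ∉ ks := (List.nodup_cons.mp hnd).1
    have hrw : ks.flatMap (fun k' => l.filter (fun x => x.1 == k'))
        = ks.flatMap (fun k' => (l.filter (fun x => !(x.1 == k))).filter (fun x => x.1 == k')) := by
      apply List.flatMap_congr
      intro k' hk'
      rw [List.filter_filter]
      apply List.filter_congr
      intro x _
      by_cases hx : x.1 = k'
      · have hne : k' ≠ k := fun h => hk (h ▸ hk')
        simp [hx, hne]
      · simp [hx]
    rw [hrw]
    have ihl := ih (l.filter (fun x => !(x.1 == k))) (List.nodup_cons.mp hnd).2
      (by intro x hx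
          rw [List.mem_filter] at hx
          have := hcov x hx.1
          have hxk : x.1 ≠ k := by simpa using hx.2
          simpa [hxk] using this)
    exact (ihl.append_left _).trans (List.filter_append_perm _ l)

lemma pvKeys_pairwise (p : List Int) : (pvKeys p).Pairwise (· < ·) :=
  PySem.List.sorted_ofList_pairwise_lt _

lemma pvGrouped_perm (p : List Int) : (pvGrouped p).Perm (pvPrefs p) := by
  have hnd : (pvKeys p).Nodup := (pvKeys_pairwise p).imp (fun h => ne_of_lt h)
  have hcov : ∀ x ∈ pvPrefs p, x.1 ∈ pvKeys p := by
    intro x hx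
    unfold pvKeys
    rw [PySem.List.mem_sorted, PySem.Set.mem_ofList]
    exact List.mem_map_of_mem hx
  exact flatMap_filter_perm (pvKeys p) (pvPrefs p) hnd hcov

lemma pvGrouped_pairwise (p : List Int) :
    (pvGrouped p).Pairwise (fun a b => pvKey (PySem.List.len p) a < pvKey (PySem.List.len p) b) := by
  unfold pvGrouped
  rw [List.pairwise_flatMap]
  constructor
  · intro k hk
    refine ((pvPrefs_snd_pairwise p).filter _).imp_of_mem ?_
    intro a b ha hb hab
    rw [List.mem_filter] at ha hb
    have h1 : a.1 = k := by simpa using ha.2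
    have h2 : b.1 = k := by simpa using hb.2
    simp only [pvKey, h1, h2]
    omega
  · refine (pvKeys_pairwise p).imp_of_mem ?_
    intro k1 k2 _ _ hlt x hx y hy
    rw [List.mem_filter] at hx hy
    have h1 : x.1 = k1 := by simpa using hx.2
    have h2 : y.1 = k2 := by simpa using hy.2
    have bx := pvPrefs_snd_bounds p x hx.1
    have byy := pvPrefs_snd_bounds p y hy.1
    have hM : 0 ≤ PySem.List.len p := le_of_lt (lt_of_le_of_lt bx.1 bx.2)
    have : (x.1 + 1) * PySem.List.len p ≤ y.1 * PySem.List.len p :=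
      mul_le_mul_of_nonneg_right (by omega) hM
    simp only [pvKey]
    nlinarith [bx.1, bx.2, byy.1, byy.2]

lemma sorted_key_eq_grouped (p : List Int) :
    PySem.List.sorted (pvPrefs p) (pvKey (PySem.List.len p)) = pvGrouped p :=
  PySem.List.sorted_eq_of_perm_of_pairwise_lt _ _ _ (pvGrouped_perm p) (pvGrouped_pairwise p)

lemma prefs_loop_eq (p : List Int) :
    (PySem.List.pyRange 0 (PySem.List.len p)).foldl
      (fun acc i => if PySem.List.pyGetD p i 0 ≠ 0 then acc ++ [(PySem.List.pyGetD p i 0, i)] else acc) []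
    = pvPrefs p := by
  rw [PySem.List.foldl_append_ite (p := fun i => PySem.List.pyGetD p i 0 ≠ 0)
      (f := fun i => (PySem.List.pyGetD p i 0, i))]
  unfold pvPrefs
  rw [PySem.List.enumerate_eq_map_pyRange p 0, List.filter_map, List.map_map]
  rfl

lemma orderedPaper_eq (p : List Int) :
    orderedPaper p = (pvGrouped p).map (fun x => x.2 + 1) := by
  unfold orderedPaper
  simp only [prefs_loop_eq p, sorted2_eq_sorted_key p, sorted_key_eq_grouped p]
  rw [PySem.List.foldl_append_singleton_eq_map
      (f := fun i => (PySem.List.pyGetD (pvGrouped p) i (0, 0)).2 + 1)]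
  have : List.map (fun i => (PySem.List.pyGetD (pvGrouped p) i (0, 0)).2 + 1)
        (PySem.List.pyRange 0 (PySem.List.len (pvGrouped p)))
      = List.map (fun x => x.2 + 1)
        (List.map (fun i => PySem.List.pyGetD (pvGrouped p) i (0, 0))
          (PySem.List.pyRange 0 (PySem.List.len (pvGrouped p)))) := by
    rw [List.map_map]; rfl
  rw [this, PySem.List.map_pyGetD_pyRange_zero]
  simp

lemma buckets_eq (p : List Int) :
    (PySem.List.enumerate p).foldl
      (fun d iv => if iv.2 ≠ 0 then d.modify iv.2 [] (fun l => l ++ [iv.1 + 1]) else d)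
      PySem.Dict.empty = pvBuckets p := by
  have h1 : (PySem.List.enumerate p).foldl
      (fun (d : PySem.Dict Int (List Int)) iv => if iv.2 ≠ 0 then d.modify iv.2 [] (fun l => l ++ [iv.1 + 1]) else d)
      PySem.Dict.empty
      = ((PySem.List.enumerate p).filter (fun iv => decide (iv.2 ≠ 0))).foldl
        (fun (d : PySem.Dict Int (List Int)) iv => d.modify iv.2 [] (fun l => l ++ [iv.1 + 1])) PySem.Dict.empty :=
    PySem.List.foldl_ite_eq_foldl_filter (fun iv : Int × Int => iv.2 ≠ 0)
      (fun (d : PySem.Dict Int (List Int)) iv => d.modify iv.2 [] (fun l => l ++ [iv.1 + 1])) _ _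
  rw [h1]
  unfold pvBuckets pvPrefs
  rw [List.map_map, List.foldl_map]
  rfl

lemma orderedPaper_alt_eq (p : List Int) :
    orderedPaper_alt p = (pvGrouped p).map (fun x => x.2 + 1) := by
  have h0 : orderedPaper_alt p
      = (PySem.List.sorted ((PySem.List.enumerate p).foldl
          (fun d iv => if iv.2 ≠ 0 then d.modify iv.2 [] (fun l => l ++ [iv.1 + 1]) else d)
          PySem.Dict.empty).keys (fun k => k)).foldl
        (fun out k => out ++ ((PySem.List.enumerate p).foldl
          (fun d iv => if iv.2 ≠ 0 then d.modify iv.2 [] (fun l => l ++ [iv.1 + 1]) else d)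
          PySem.Dict.empty).getD k []) [] := rfl
  rw [h0, buckets_eq]
  have hk : (pvBuckets p).keys = PySem.Set.ofList ((pvPrefs p).map (fun x => x.1)) := by
    have h2 : (pvBuckets p).keys
        = PySem.Set.update PySem.Dict.empty.keys
            (((pvPrefs p).map (fun x => (x.1, x.2 + 1))).map (fun q => q.1)) :=
      PySem.Dict.keys_foldl_modify_key ((pvPrefs p).map (fun x => (x.1, x.2 + 1)))
        (fun q => q.1) [] (fun d q => fun l => l ++ [q.2]) PySem.Dict.empty
    rw [h2, PySem.Dict.keys_empty, PySem.Set.update_nil_left, List.map_map]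
    rfl
  have hget : ∀ k, (pvBuckets p).getD k []
      = ((pvPrefs p).filter (fun x => x.1 == k)).map (fun x => x.2 + 1) := by
    intro k
    unfold pvBuckets
    have h3 : ((((pvPrefs p).map (fun x => (x.1, x.2 + 1))).foldl
          (fun (d : PySem.Dict Int (List Int)) q => d.modify q.1 [] (fun l => l ++ [q.2])) PySem.Dict.empty)).getD k []
        = PySem.Dict.empty.getD k []
            ++ (((pvPrefs p).map (fun x => (x.1, x.2 + 1))).filter (fun q => q.1 == k)).map
                (fun q => q.2) :=
      PySem.Dict.getD_foldl_modify_append ((pvPrefs p).map (fun x => (x.1, x.2 + 1)))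
        PySem.Dict.empty k
    rw [h3, List.filter_map, List.map_map]
    simp [PySem.Dict.getD_empty]
    rfl
  have h4 : (PySem.List.sorted (pvBuckets p).keys (fun k => k)).foldl
        (fun out k => out ++ (pvBuckets p).getD k []) []
      = [] ++ (PySem.List.sorted (pvBuckets p).keys (fun k => k)).flatMap
          (fun k => (pvBuckets p).getD k []) :=
    PySem.List.foldl_append_eq_flatMap (fun k => (pvBuckets p).getD k []) _ []
  rw [h4, hk, List.nil_append]
  unfold pvGrouped
  rw [List.map_flatMap]
  exact List.flatMap_congr (fun k _ => hget k)

-- ===== VERDICT (by name: the statement is the Claim_ definition above) =====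
theorem orderedPaper_spec : Claim_equal_orderedPaper := by
  intro p _
  unfold Spec_orderedPaper
  rw [orderedPaper_eq, orderedPaper_alt_eq]
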